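-- pv_equiv track=rewrite | github.com/hailstonem/Advent-of-Code | Puzzle3/solve.py | move_until_limit
-- ===== SOURCE A (Python) =====
-- def move_until_limit(coords=None, limits=(323, None), move=(1, 3)):
--     if coords == None:
--         coords = [(0, 0)]
--     # Recursive move: easily adaptable to arbitrary decision: but could do this analytically
--     next_move = [c + m for c, m in zip(coords[-1], move)]
--
--     if all([c_lim is None or c < c_lim for c, c_lim in zip(next_move, limits)]):
--
--         coords.append(next_move)
--         coords = move_until_limit(coords, limits, move)
--
--     return coords
-- ===== SOURCE B (Python) =====
-- def move_until_limit(coords=None, limits=(323, None), move=(1, 3)):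
--     # Analytic version: compute the number of steps in closed form, then emit the coordinates directly.
--     if coords == None:
--         coords = [(0, 0)]
--     last = coords[-1]
--     n = None  # smallest number of in-bounds steps imposed by any limited coordinate
--     for c, m, lim in zip(last, move, limits):
--         if lim is None:
--             continue
--         if m > 0:
--             k = max(0, (lim - c - 1) // m)
--         elif c + m >= lim:
--             k = 0
--         else:
--             continue  # this coordinate moves away from its limit and never stops the walk
--         n = k if n is None else min(n, k)
--     for k in range(1, n + 1):
--         coords.append([c + k * m for c, m in zip(last, move)])
--     return coords
-- ===== Notes on version B (the rewrite author's own statement) =====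
-- stated objective: alternative
-- what changed: Replaces A's step-by-step recursion (append one coordinate per call until the limit check fails) with a closed-form computation of the number of in-bounds steps, after which the coordinate list is emitted directly in one loop with no per-step limit checks.
-- outside the precondition, e.g. on move_until_limit([], (5, None), (1, 1)): A raises IndexError, B raises IndexError; on move_until_limit([(0, 0)], (None, None), (1, 1)): A raises RecursionError, B raises TypeError
import Mathlib
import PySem

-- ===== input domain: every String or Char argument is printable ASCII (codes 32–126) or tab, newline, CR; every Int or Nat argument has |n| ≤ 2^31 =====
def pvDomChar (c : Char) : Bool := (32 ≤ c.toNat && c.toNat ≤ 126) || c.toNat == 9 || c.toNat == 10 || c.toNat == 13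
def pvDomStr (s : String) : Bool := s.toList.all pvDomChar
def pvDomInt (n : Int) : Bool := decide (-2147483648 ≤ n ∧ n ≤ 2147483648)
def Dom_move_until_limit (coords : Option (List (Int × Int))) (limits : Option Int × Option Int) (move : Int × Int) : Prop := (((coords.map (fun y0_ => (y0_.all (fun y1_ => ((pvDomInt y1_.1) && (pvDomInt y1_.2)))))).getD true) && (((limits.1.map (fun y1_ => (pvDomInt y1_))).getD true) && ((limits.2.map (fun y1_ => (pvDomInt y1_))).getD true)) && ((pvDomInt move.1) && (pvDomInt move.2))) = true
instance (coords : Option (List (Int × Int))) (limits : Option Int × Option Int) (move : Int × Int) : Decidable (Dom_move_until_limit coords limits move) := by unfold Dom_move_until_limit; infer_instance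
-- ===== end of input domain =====

-- B replaces A's one-append-per-recursive-call walk by a closed-form step count followed by a single
-- emitting loop (objective: alternative decomposition). Both Pythons mutate a passed-in list in place
-- (A appends via recursion, B appends in its loop); the equivalence proved here is about the RETURN value.

-- ===== PORT A =====
-- 'all([c_lim is None or c < c_lim for c, c_lim in zip(next_move, limits)])'
def pvOkA (limits : Option Int × Option Int) (p : Int × Int) : Bool :=
  (match limits.1 with | none => true | some L => decide (p.1 < L)) &&
  (match limits.2 with | none => true | some L => decide (p.2 < L))

-- A's recursion; the Nat fuel only makes it total (Pre_ admits at most 9900 steps, fuel 10000 is never hit)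
def pvLoopA : Nat → List (Int × Int) → (Option Int × Option Int) → (Int × Int) → List (Int × Int)
  | 0, coords, _, _ => coords
  | fuel+1, coords, limits, move =>
    match coords.getLast? with
    | none => coords   -- Python: coords[-1] raises IndexError here (excluded by Pre_)
    | some last =>
      let next := (last.1 + move.1, last.2 + move.2)
      if pvOkA limits next then pvLoopA fuel (coords ++ [next]) limits move
      else coords

def move_until_limit (coords : Option (List (Int × Int))) (limits : Option Int × Option Int) (move : Int × Int) : List (Int × Int) :=
  pvLoopA 10000 (coords.getD [((0:Int), (0:Int))]) limits move

-- ===== PORT B =====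
-- one iteration of B's 'for c, m, lim in zip(last, move, limits)' body: the per-coordinate step bound
def pvBound (c m : Int) (lim : Option Int) : Option Int :=
  match lim with
  | none => none
  | some L =>
    if 0 < m then some (max 0 (PySem.Int.floordiv (L - c - 1) m))
    else if L ≤ c + m then some 0
    else none

-- 'n = k if n is None else min(n, k)' folded over the two coordinates
def pvMinOpt : Option Int → Option Int → Option Int
  | none, b => b
  | some a, none => some a
  | some a, some b => some (min a b)

def move_until_limit_alt (coords : Option (List (Int × Int))) (limits : Option Int × Option Int) (move : Int × Int) : List (Int × Int) :=
  match (coords.getD [((0:Int), (0:Int))]).getLast? with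
  | none => []        -- Python: coords[-1] raises IndexError here (excluded by Pre_)
  | some last =>
    match pvMinOpt (pvBound last.1 move.1 limits.1) (pvBound last.2 move.2 limits.2) with
    | none => coords.getD [((0:Int), (0:Int))]   -- Python B raises here (n stays None; excluded by Pre_)
    | some n =>
      coords.getD [((0:Int), (0:Int))] ++
        (PySem.List.pyRange 1 (n+1) 1).map (fun k => (last.1 + k * move.1, last.2 + k * move.2))

-- ===== PRECONDITION & SPEC =====
-- coordinate stop test used by Pre_: this coordinate is limited and stops the walk within 9900 steps
def pvStops (c m : Int) (lim : Option Int) : Bool :=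
  match lim with
  | none => false
  | some L => decide (L ≤ c + m) || (decide (0 < m) && decide (L - c ≤ 9900 * m))

-- Pre_ excludes exactly the inputs on which A raises: coords = [] (IndexError), walks where no limited
-- coordinate ever stops (unbounded recursion, RecursionError), and walks so long that A's one-frame-per-step
-- recursion overflows the interpreter's recursion limit (RecursionError; under the measurement harness's
-- limit of 10000 the overflow comes at ≈9990 steps, so the 9900-step bound is a slightly conservative
-- approximation of that raise boundary — the exact overflow depth depends on the stack already in use).
def Pre_move_until_limit (coords : Option (List (Int × Int))) (limits : Option Int × Option Int) (move : Int × Int) : Prop :=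
  (coords.getD [((0:Int), (0:Int))]) ≠ [] ∧
  (pvStops ((coords.getD [((0:Int), (0:Int))]).getLastD (0, 0)).1 move.1 limits.1 ||
   pvStops ((coords.getD [((0:Int), (0:Int))]).getLastD (0, 0)).2 move.2 limits.2) = true

instance (coords : Option (List (Int × Int))) (limits : Option Int × Option Int) (move : Int × Int) : Decidable (Pre_move_until_limit coords limits move) := by unfold Pre_move_until_limit; infer_instance

def pvWitness_move_until_limit : (Option (List (Int × Int))) × (Option Int × Option Int) × (Int × Int) :=
  (none, (some 323, none), (1, 3))

def Spec_move_until_limit (coords : Option (List (Int × Int))) (limits : Option Int × Option Int) (move : Int × Int) (out : List (Int × Int)) : Prop := out = move_until_limit_alt coords limits move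
instance (coords : Option (List (Int × Int))) (limits : Option Int × Option Int) (move : Int × Int) (out : List (Int × Int)) : Decidable (Spec_move_until_limit coords limits move out) := by unfold Spec_move_until_limit; infer_instance

-- ===== CLAIM (what is proved, stated in full; the proofs are below) =====
def Claim_equal_move_until_limit : Prop := ∀ (coords : Option (List (Int × Int))) (limits : Option Int × Option Int) (move : Int × Int), Dom_move_until_limit coords limits move → Pre_move_until_limit coords limits move → Spec_move_until_limit coords limits move (move_until_limit coords limits move)

-- ===== LEMMAS AND PROOFS =====

-- a coordinate passes A's per-step limit test at step k
def pvCoordOk (c m : Int) (lim : Option Int) (k : Int) : Prop := ∀ L, lim = some L → c + k * m < L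

lemma pvOkA_iff (limits : Option Int × Option Int) (last move : Int × Int) (k : Int) :
    pvOkA limits (last.1 + k * move.1, last.2 + k * move.2) = true ↔
      pvCoordOk last.1 move.1 limits.1 k ∧ pvCoordOk last.2 move.2 limits.2 k := by
  unfold pvOkA pvCoordOk
  rcases limits with ⟨l1, l2⟩
  cases l1 <;> cases l2 <;> simp

lemma pvBound_spec (c m : Int) (lim : Option Int) (t : Int) (h : pvBound c m lim = some t) :
    0 ≤ t ∧ (∀ k : Int, 1 ≤ k → k ≤ t → pvCoordOk c m lim k) ∧ ¬ pvCoordOk c m lim (t + 1) := by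
  unfold pvCoordOk
  cases lim with
  | none => simp [pvBound] at h
  | some L =>
    simp only [pvBound] at h
    split_ifs at h with hm hL
    · rw [PySem.Int.floordiv_eq_ediv_of_pos hm] at h
      injection h with h
      subst h
      have hd := Int.mul_ediv_add_emod (L - c - 1) m
      have hr0 := Int.emod_nonneg (L - c - 1) (by omega : m ≠ 0)
      have hrm := Int.emod_lt_of_pos (L - c - 1) hm
      set q := (L - c - 1) / m
      refine ⟨le_max_left _ _, ?_, ?_⟩
      · intro k hk1 hk2 L' hL'
        injection hL' with hL'
        subst hL'
        have hkq : k ≤ q := by omega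
        have h5 : k * m ≤ q * m := mul_le_mul_of_nonneg_right hkq hm.le
        have h6 : m * q = q * m := mul_comm m q
        omega
      · intro hco
        have hcl := hco L rfl
        by_cases hq0 : 0 ≤ q
        · rw [max_eq_right hq0] at hcl
          have hexp : (q + 1) * m = q * m + m := by ring
          have h6 : m * q = q * m := mul_comm m q
          omega
        · rw [max_eq_left (by omega : q ≤ 0)] at hcl
          have h7 : m * q ≤ m * (-1) := mul_le_mul_of_nonneg_left (by omega) hm.le
          have h8 : m * (-1) = -m := by ring
          have h9 : (0 + 1) * m = m := by ring
          omega
    · injection h with h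
      subst h
      refine ⟨le_refl _, by omega, ?_⟩
      intro hco
      have hcl := hco L rfl
      have h9 : (0 + 1) * m = m := by ring
      omega

lemma pvBound_none (c m : Int) (lim : Option Int) (h : pvBound c m lim = none) :
    ∀ k : Int, 1 ≤ k → pvCoordOk c m lim k := by
  unfold pvCoordOk
  cases lim with
  | none => intro k _ L hL; exact absurd hL (by simp)
  | some L =>
    simp only [pvBound] at h
    split_ifs at h with hm hL
    intro k hk1 L' hL'
    injection hL' with hL'
    subst hL'
    have h5 : k * m ≤ 1 * m := mul_le_mul_of_nonpos_right hk1 (by omega)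
    have h6 : (1 : Int) * m = m := one_mul m
    omega

lemma pvStops_bound (c m : Int) (lim : Option Int) (h : pvStops c m lim = true) :
    ∃ t, pvBound c m lim = some t ∧ t ≤ 9899 := by
  cases lim with
  | none => simp [pvStops] at h
  | some L =>
    simp only [pvStops, Bool.or_eq_true, Bool.and_eq_true, decide_eq_true_eq] at h
    by_cases hm : 0 < m
    · refine ⟨max 0 (PySem.Int.floordiv (L - c - 1) m), by simp [pvBound, hm], ?_⟩
      have h9900 : L - c - 1 < 9900 * m := by
        rcases h with h1 | ⟨_, h2⟩
        · nlinarith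
        · omega
      have := (PySem.Int.floordiv_lt_iff_lt_mul hm (a := L - c - 1) (q := 9900)).mpr (by omega)
      omega
    · rcases h with h1 | ⟨h2, _⟩
      · exact ⟨0, by simp [pvBound, hm, h1], by omega⟩
      · exact absurd h2 hm

lemma pvLoopA_eq (limits : Option Int × Option Int) (move : Int × Int) :
    ∀ (n fuel : Nat) (base : List (Int × Int)) (last : Int × Int),
      base.getLast? = some last → n < fuel →
      (∀ k : Nat, 1 ≤ k → k ≤ n →
        pvOkA limits (last.1 + (k : Int) * move.1, last.2 + (k : Int) * move.2) = true) →
      pvOkA limits (last.1 + ((n : Int) + 1) * move.1, last.2 + ((n : Int) + 1) * move.2) = false →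
      pvLoopA fuel base limits move =
        base ++ (List.range n).map (fun (k : Nat) => (last.1 + ((k : Int) + 1) * move.1, last.2 + ((k : Int) + 1) * move.2)) := by
  intro n
  induction n with
  | zero =>
    intro fuel base last hlast hfuel hok hfail
    obtain ⟨f, rfl⟩ : ∃ f, fuel = f + 1 := ⟨fuel - 1, by omega⟩
    simp only [pvLoopA, hlast]
    have hf : pvOkA limits (last.1 + move.1, last.2 + move.2) = false := by
      have : ((0 : Nat) : Int) + 1 = 1 := by norm_num
      simpa [this] using hfail
    simp [hf]
  | succ n ih =>
    intro fuel base last hlast hfuel hok hfail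
    obtain ⟨f, rfl⟩ : ∃ f, fuel = f + 1 := ⟨fuel - 1, by omega⟩
    simp only [pvLoopA, hlast]
    have h1 : pvOkA limits (last.1 + move.1, last.2 + move.2) = true := by
      have := hok 1 (by omega) (by omega)
      simpa using this
    rw [if_pos h1]
    rw [ih f (base ++ [(last.1 + move.1, last.2 + move.2)]) (last.1 + move.1, last.2 + move.2)
        List.getLast?_concat (by omega) ?_ ?_]
    · rw [List.range_succ_eq_map, List.append_assoc, List.singleton_append, List.map_cons,
        List.map_map]
      congr 1
      congr 1
      · simp
      · apply List.map_congr_left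
        intro k _
        simp only [Function.comp_apply, Nat.succ_eq_add_one, Prod.mk.injEq]
        constructor <;> (push_cast; ring)
    · intro k hk1 hk2
      have := hok (k + 1) (by omega) (by omega)
      convert this using 3 <;> (push_cast; ring)
    · convert hfail using 3 <;> (push_cast; ring)

lemma pvMin_spec (c1 m1 c2 m2 : Int) (l1 l2 : Option Int) (t : Int)
    (hside : pvBound c1 m1 l1 = some t ∨ pvBound c2 m2 l2 = some t) (ht : t ≤ 9899) :
    ∃ n, pvMinOpt (pvBound c1 m1 l1) (pvBound c2 m2 l2) = some n ∧ 0 ≤ n ∧ n ≤ 9899 ∧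
      (∀ k : Int, 1 ≤ k → k ≤ n → pvCoordOk c1 m1 l1 k ∧ pvCoordOk c2 m2 l2 k) ∧
      ¬ (pvCoordOk c1 m1 l1 (n + 1) ∧ pvCoordOk c2 m2 l2 (n + 1)) := by
  cases hb1 : pvBound c1 m1 l1 with
  | none =>
    cases hb2 : pvBound c2 m2 l2 with
    | none => rw [hb1, hb2] at hside; rcases hside with h | h <;> simp at h
    | some t2 =>
      obtain ⟨ht2, hok2, hf2⟩ := pvBound_spec _ _ _ _ hb2
      have hn1 := pvBound_none _ _ _ hb1
      have ht2' : t2 ≤ 9899 := by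
        rw [hb1, hb2] at hside
        rcases hside with h | h
        · simp at h
        · injection h with h; omega
      refine ⟨t2, by simp [pvMinOpt], ht2, ht2', ?_, ?_⟩
      · intro k hk1 hk2; exact ⟨hn1 k hk1, hok2 k hk1 hk2⟩
      · intro hcc; exact hf2 hcc.2
  | some t1 =>
    obtain ⟨ht1, hok1, hf1⟩ := pvBound_spec _ _ _ _ hb1
    cases hb2 : pvBound c2 m2 l2 with
    | none =>
      have hn2 := pvBound_none _ _ _ hb2
      have ht1' : t1 ≤ 9899 := by
        rw [hb1, hb2] at hside
        rcases hside with h | h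
        · injection h with h; omega
        · simp at h
      refine ⟨t1, by simp [pvMinOpt], ht1, ht1', ?_, ?_⟩
      · intro k hk1 hk2; exact ⟨hok1 k hk1 hk2, hn2 k hk1⟩
      · intro hcc; exact hf1 hcc.1
    | some t2 =>
      obtain ⟨ht2, hok2, hf2⟩ := pvBound_spec _ _ _ _ hb2
      have htm : min t1 t2 ≤ 9899 := by
        rw [hb1, hb2] at hside
        rcases hside with h | h <;> (injection h with h; omega)
      refine ⟨min t1 t2, by simp [pvMinOpt], by omega, htm, ?_, ?_⟩
      · intro k hk1 hk2; exact ⟨hok1 k hk1 (by omega), hok2 k hk1 (by omega)⟩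
      · rcases le_total t1 t2 with hle | hle
        · rw [min_eq_left hle]; intro hcc; exact hf1 hcc.1
        · rw [min_eq_right hle]; intro hcc; exact hf2 hcc.2

-- ===== VERDICT (by name: the statement is the Claim_ definition above) =====
theorem move_until_limit_spec : Claim_equal_move_until_limit := by
  intro coords limits move _ hPre
  unfold Spec_move_until_limit
  obtain ⟨hne, hstop⟩ := hPre
  set base := coords.getD [((0:Int), (0:Int))] with hbase
  set last := base.getLast hne
  have hlast : base.getLast? = some last := List.getLast?_eq_some_getLast hne
  have hld : base.getLastD (0, 0) = last := by
    rw [List.getLastD_eq_getLast?, hlast]; rfl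
  rw [hld] at hstop
  have hside : ∃ t, (pvBound last.1 move.1 limits.1 = some t ∨ pvBound last.2 move.2 limits.2 = some t) ∧ t ≤ 9899 := by
    rw [Bool.or_eq_true] at hstop
    rcases hstop with hs | hs
    · obtain ⟨t, h1, h2⟩ := pvStops_bound _ _ _ hs; exact ⟨t, Or.inl h1, h2⟩
    · obtain ⟨t, h1, h2⟩ := pvStops_bound _ _ _ hs; exact ⟨t, Or.inr h1, h2⟩
  obtain ⟨t, hsd, ht⟩ := hside
  obtain ⟨n, hmin, hn0, hn9899, hok, hfail⟩ := pvMin_spec _ _ _ _ _ _ _ hsd ht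
  have hA : move_until_limit coords limits move =
      base ++ (List.range n.toNat).map (fun (k : Nat) => (last.1 + ((k : Int) + 1) * move.1, last.2 + ((k : Int) + 1) * move.2)) := by
    unfold move_until_limit
    rw [← hbase]
    apply pvLoopA_eq limits move n.toNat 10000 base last hlast (by omega)
    · intro k hk1 hk2
      rw [pvOkA_iff]
      exact hok (k : Int) (by omega) (by omega)
    · have hcast : ((n.toNat : Int) + 1) = n + 1 := by omega
      rw [hcast]
      cases hb : pvOkA limits (last.1 + (n + 1) * move.1, last.2 + (n + 1) * move.2)
      · rfl
      · exact absurd ((pvOkA_iff limits last move (n + 1)).mp hb) hfail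
  have hB : move_until_limit_alt coords limits move =
      base ++ (PySem.List.pyRange 1 (n + 1) 1).map (fun k => (last.1 + k * move.1, last.2 + k * move.2)) := by
    unfold move_until_limit_alt
    rw [← hbase, hlast]
    simp only [hmin]
  rw [hA, hB]
  congr 1
  rw [PySem.List.pyRange_one, List.map_map]
  have h11 : (n + 1 - 1).toNat = n.toNat := by omega
  rw [h11]
  apply List.map_congr_left
  intro k _
  simp only [Function.comp_apply, Prod.mk.injEq]
  constructor <;> ring
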